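-- pv_equiv track=rewrite | github.com/hakanardo/ggdtrack | ggdtrack/graph_diff.py | merge_idx
-- ===== SOURCE A (Python) =====
-- def merge_idx(idxes):
--     idx = [0]
--     i0 = 0
--     for ii in idxes:
--         for i in ii[1:]:
--             idx.append(i + i0)
--         i0 = idx[-1]
--     return idx
-- ===== SOURCE B (Python) =====
-- def merge_idx(idxes):
--     # pass 1: cumulative offsets, one per sublist
--     offs = []
--     c = 0
--     for ii in idxes:
--         offs.append(c)
--         if len(ii) > 1:
--             c += ii[-1]
--     # pass 2: emit shifted tails
--     return [0] + [i + off for ii, off in zip(idxes, offs) for i in ii[1:]]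
-- ===== Notes on version B (the rewrite author's own statement) =====
-- stated objective: alternative
-- what changed: Replaces A's single loop that threads the running offset i0 through idx[-1] with two separate passes: one building a cumulative offset table (one offset per sublist), then a flat comprehension over zip(idxes, offs) emitting the shifted tails.
import Mathlib
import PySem

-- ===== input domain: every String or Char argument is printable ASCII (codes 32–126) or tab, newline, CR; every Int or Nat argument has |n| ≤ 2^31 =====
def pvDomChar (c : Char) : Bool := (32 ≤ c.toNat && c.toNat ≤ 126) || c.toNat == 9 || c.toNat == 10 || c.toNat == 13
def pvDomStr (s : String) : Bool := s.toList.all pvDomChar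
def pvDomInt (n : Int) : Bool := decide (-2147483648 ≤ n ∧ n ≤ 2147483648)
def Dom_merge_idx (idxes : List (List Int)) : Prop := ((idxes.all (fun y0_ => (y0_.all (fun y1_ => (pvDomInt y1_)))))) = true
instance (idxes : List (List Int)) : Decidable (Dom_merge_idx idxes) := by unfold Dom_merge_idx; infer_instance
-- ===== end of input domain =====

-- B separates the offset computation (a cumulative-sum pass) from the emission pass; alternative decomposition, same cost.

-- ===== PORT A =====
-- literal port: idx starts as [0] and is never empty, so idx[-1] always succeeds; `.getD 0` is unreachable
def merge_idx (idxes : List (List Int)) : List Int :=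
  (idxes.foldl (fun (s : List Int × Int) ii =>
      let idx := (PySem.List.slice ii (some 1) none).foldl (fun idx i => idx ++ [i + s.2]) s.1
      (idx, (PySem.List.pyGet? idx (-1)).getD 0))
    ([0], 0)).1

-- ===== PORT B =====
-- pass 1: offset table (offs, running sum c); ii[-1] is only read when len ii > 1, so `.getD 0` is unreachable
def merge_idx_alt (idxes : List (List Int)) : List Int :=
  let offs := (idxes.foldl (fun (s : List Int × Int) ii =>
      (s.1 ++ [s.2], if 1 < ii.length then s.2 + (PySem.List.pyGet? ii (-1)).getD 0 else s.2))
    ([], 0)).1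
  0 :: (idxes.zip offs).flatMap (fun p => (PySem.List.slice p.1 (some 1) none).map (fun i => i + p.2))

-- ===== PRECONDITION & SPEC =====
def Spec_merge_idx (idxes : List (List Int)) (out : List Int) : Prop := out = merge_idx_alt idxes
instance (idxes : List (List Int)) (out : List Int) : Decidable (Spec_merge_idx idxes out) := by unfold Spec_merge_idx; infer_instance

-- ===== CLAIM (what is proved, stated in full; the proofs are below) =====
def Claim_equal_merge_idx : Prop := ∀ (idxes : List (List Int)), Dom_merge_idx idxes → Spec_merge_idx idxes (merge_idx idxes)

-- ===== LEMMAS AND PROOFS =====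

-- the next offset after processing sublist ii with current offset c
def pvNext (c : Int) (ii : List Int) : Int :=
  if 1 < ii.length then c + (PySem.List.pyGet? ii (-1)).getD 0 else c

-- the elements emitted for idxes starting at offset c (shared characterisation)
def pvEmit : List (List Int) → Int → List Int
  | [], _ => []
  | ii :: rest, c => ii.tail.map (fun i => i + c) ++ pvEmit rest (pvNext c ii)

-- the offset table with initial offset c
def pvOffs : List (List Int) → Int → List Int
  | [], _ => []
  | ii :: rest, c => c :: pvOffs rest (pvNext c ii)

theorem pv_inner_fold (l acc : List Int) (c : Int) :
    l.foldl (fun idx i => idx ++ [i + c]) acc = acc ++ l.map (fun i => i + c) := by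
  induction l generalizing acc with
  | nil => simp
  | cons x xs ih => simp [List.foldl, ih, List.append_assoc]

theorem pv_tail_getLast (ii : List Int) (h : ii.tail ≠ []) :
    ii.tail.getLast? = ii.getLast? := by
  cases ii with
  | nil => simp at h
  | cons x xs => cases xs with
    | nil => simp at h
    | cons y ys => simp [List.getLast?_cons_cons]

theorem pv_newlast (pre ii : List Int) (c : Int) (hpre : pre.getLast? = some c) :
    (pre ++ ii.tail.map (fun i => i + c)).getLast? = some (pvNext c ii) := by
  by_cases h : ii.tail = []
  · have hlen : ¬ 1 < ii.length := by
      cases ii with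
      | nil => simp
      | cons x xs => simp_all
    simp [h, pvNext, hlen, hpre]
  · have hmap : ii.tail.map (fun i => i + c) ≠ [] := by
      intro hc; exact h (List.map_eq_nil_iff.mp hc)
    have hlen : 1 < ii.length := by
      cases ii with
      | nil => simp at h
      | cons x xs => cases xs with
        | nil => simp at h
        | cons y ys => simp
    rw [List.getLast?_append_of_ne_nil _ hmap, List.getLast?_map, pv_tail_getLast ii h]
    cases hg : ii.getLast? with
    | none => simp [List.getLast?_eq_none_iff] at hg; simp [hg] at hlen
    | some v =>
      simp [pvNext, hlen, PySem.List.pyGet?_neg_one, hg, Int.add_comm]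

theorem pvA_fold (idxes : List (List Int)) (pre : List Int) (c : Int)
    (hpre : pre.getLast? = some c) :
    (idxes.foldl (fun (s : List Int × Int) ii =>
      let idx := (PySem.List.slice ii (some 1) none).foldl (fun idx i => idx ++ [i + s.2]) s.1
      (idx, (PySem.List.pyGet? idx (-1)).getD 0)) (pre, c)).1
    = pre ++ pvEmit idxes c := by
  induction idxes generalizing pre c with
  | nil => simp [pvEmit]
  | cons ii rest ih =>
    simp only [List.foldl, pvEmit]
    rw [PySem.List.slice_from_one, pv_inner_fold]
    rw [PySem.List.pyGet?_neg_one, pv_newlast pre ii c hpre]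
    rw [Option.getD_some]
    rw [ih _ (pvNext c ii) (pv_newlast pre ii c hpre), List.append_assoc]

theorem pvB_fold (idxes : List (List Int)) (acc : List Int) (c : Int) :
    (idxes.foldl (fun (s : List Int × Int) ii =>
      (s.1 ++ [s.2], if 1 < ii.length then s.2 + (PySem.List.pyGet? ii (-1)).getD 0 else s.2))
      (acc, c)).1 = acc ++ pvOffs idxes c := by
  induction idxes generalizing acc c with
  | nil => simp [pvOffs]
  | cons ii rest ih => simp [List.foldl, pvOffs, ih, pvNext, List.append_assoc]

theorem pvB_emit (idxes : List (List Int)) (c : Int) :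
    (idxes.zip (pvOffs idxes c)).flatMap
      (fun p => (PySem.List.slice p.1 (some 1) none).map (fun i => i + p.2))
    = pvEmit idxes c := by
  induction idxes generalizing c with
  | nil => simp [pvOffs, pvEmit]
  | cons ii rest ih =>
    simp only [pvOffs, pvEmit, List.zip_cons_cons, List.flatMap_cons]
    rw [ih, PySem.List.slice_from_one]

-- ===== VERDICT (by name: the statement is the Claim_ definition above) =====
theorem merge_idx_spec : Claim_equal_merge_idx := by
  intro idxes _
  show merge_idx idxes = merge_idx_alt idxes
  unfold merge_idx merge_idx_alt
  rw [pvA_fold idxes [0] 0 (by simp)]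
  simp only [pvB_fold, pvB_emit, List.nil_append]
  rfl
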